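-- pv_equiv track=rewrite | github.com/trishtr/llm_schemaMapping | src/profiler/pattern_recognizer.py | _check_field_name_match
-- ===== SOURCE A (Python) =====
-- from typing import Dict, Any, List, Optional, Set, Union, Tuple
--
-- def _check_field_name_match(field_name: Optional[str], pattern_info: Dict[str, Any]) -> bool:
--     """
--     Check if field name matches the pattern's field name criteria.
--
--     Args:
--         field_name: The field name to check
--         pattern_info: Pattern information dictionary
--
--     Returns:
--         True if field name matches, False otherwise
--     """
--     if not field_name:
--         return True  # No field name provided, so don't filter
--
--     field_name_lower = field_name.lower()
--
--     # Check exact field name matches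
--     if 'field_names' in pattern_info:
--         expected_names = [name.lower() for name in pattern_info['field_names']]
--         if any(expected_name == field_name_lower for expected_name in expected_names):
--             return True
--         # Also check if field name contains any of the expected names
--         if any(expected_name in field_name_lower for expected_name in expected_names):
--             return True
--
--     # Check pattern-based matching (new feature)
--     if 'patterns' in pattern_info:
--         for pattern in pattern_info['patterns']:
--             pattern_lower = pattern.lower()
--             if pattern_lower.startswith('*') and pattern_lower.endswith('*'):
--                 # Wildcard pattern: *text*
--                 search_text = pattern_lower[1:-1]
--                 if search_text in field_name_lower:
--                     return True
--             elif pattern_lower.startswith('*'):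
--                 # Suffix pattern: *text
--                 suffix = pattern_lower[1:]
--                 if field_name_lower.endswith(suffix):
--                     return True
--             elif pattern_lower.endswith('*'):
--                 # Prefix pattern: text*
--                 prefix = pattern_lower[:-1]
--                 if field_name_lower.startswith(prefix):
--                     return True
--             else:
--                 # Exact match
--                 if pattern_lower == field_name_lower:
--                     return True
--
--     return False
-- ===== SOURCE B (Python) =====
-- def _check_field_name_match(field_name, pattern_info):
--     if not field_name:
--         return True
--     name = field_name.lower()
--     n = len(name)
--     # Each criterion becomes (core, lead, trail): core must occur in name at some
--     # position i with (lead or i == 0) and (trail or i + len(core) == n).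
--     cores = [(fn.lower(), True, True) for fn in pattern_info.get('field_names', [])]
--     for p in pattern_info.get('patterns', []):
--         p = p.lower()
--         lead = p.startswith('*')
--         trail = p.endswith('*')
--         start = 1 if lead else 0
--         end = len(p) - 1 if trail else len(p)
--         cores.append((p[start:end], lead, trail))
--     # One positional brute-force search replaces ==, in, startswith and endswith.
--     for core, lead, trail in cores:
--         k = len(core)
--         for i in range(n + 1):
--             if (lead or i == 0) and (trail or i + k == n) and name[i:i+k] == core:
--                 return True
--     return False
-- ===== Notes on version B (the rewrite author's own statement) =====
-- stated objective: alternative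
-- what changed: B replaces A's four per-pattern branch predicates (==, in, startswith, endswith) and its separate exact-then-substring field_names passes by one uniform mechanism: each criterion is compiled to (core, lead, trail) anchor flags and matched by a single brute-force scan over all start positions of the name.
import Mathlib
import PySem

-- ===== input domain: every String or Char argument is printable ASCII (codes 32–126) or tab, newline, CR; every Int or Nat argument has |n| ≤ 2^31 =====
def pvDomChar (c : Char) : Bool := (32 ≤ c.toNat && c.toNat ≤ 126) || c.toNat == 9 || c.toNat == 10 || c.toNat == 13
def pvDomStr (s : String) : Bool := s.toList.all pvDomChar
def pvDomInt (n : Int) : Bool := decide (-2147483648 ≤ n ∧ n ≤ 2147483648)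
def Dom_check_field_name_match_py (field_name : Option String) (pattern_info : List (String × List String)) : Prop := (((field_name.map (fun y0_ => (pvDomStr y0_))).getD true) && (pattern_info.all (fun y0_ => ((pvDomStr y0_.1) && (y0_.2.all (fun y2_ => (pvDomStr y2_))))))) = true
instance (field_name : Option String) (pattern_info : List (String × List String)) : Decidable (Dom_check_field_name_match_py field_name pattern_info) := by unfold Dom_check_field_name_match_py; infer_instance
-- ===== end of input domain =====

-- B compiles every criterion to (core, lead, trail) anchor flags and matches with one
-- positional brute-force scan instead of A's ==/in/startswith/endswith branches; objective: alternative.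

-- ===== PORT A =====
def check_field_name_match_py (field_name : Option String) (pattern_info : List (String × List String)) : Bool :=
  match field_name with
  | none => true
  | some fn =>
    if fn == "" then true
    else
      let d := PySem.Dict.mk pattern_info
      let fl := PySem.Str.lower fn
      let hitNames :=
        match d.get? "field_names" with
        | none => false
        | some names =>
          let expected := names.map (fun n => PySem.Str.lower n)
          if expected.any (fun en => en == fl) then true
          else expected.any (fun en => PySem.Str.isIn en fl)
      if hitNames then true
      else
        match d.get? "patterns" with
        | none => false
        | some pats =>
          pats.any (fun pat =>
            let pl := PySem.Str.lower pat
            if PySem.Str.startswith pl "*" && PySem.Str.endswith pl "*" then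
              PySem.Str.isIn (PySem.Str.slice pl (some 1) (some (-1))) fl
            else if PySem.Str.startswith pl "*" then
              PySem.Str.endswith fl (PySem.Str.slice pl (some 1) none)
            else if PySem.Str.endswith pl "*" then
              PySem.Str.startswith fl (PySem.Str.slice pl none (some (-1)))
            else pl == fl)

-- ===== PORT B =====
-- Source B's inner loop: scan every start position i of name (0..n inclusive);
-- name[i:i+k] with 0 ≤ i ≤ n is exactly (drop i).take k on the character list.
def pvOccAny (name core : List Char) (lead trail : Bool) : Bool :=
  (List.range (name.length + 1)).any (fun i =>
    (lead || i == 0) && (trail || i + core.length == name.length) &&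
      ((name.drop i).take core.length == core))

def check_field_name_match_py_alt (field_name : Option String) (pattern_info : List (String × List String)) : Bool :=
  match field_name with
  | none => true
  | some fn =>
    if fn == "" then true
    else
      let name := (PySem.Str.lower fn).toList
      let d := PySem.Dict.mk pattern_info
      let cores : List (List Char × Bool × Bool) :=
        ((d.get? "field_names").getD []).map
          (fun fnm => ((PySem.Str.lower fnm).toList, true, true))
        ++ ((d.get? "patterns").getD []).map (fun p =>
            let pls := PySem.Str.lower p
            let pl := pls.toList
            let lead := PySem.Str.startswith pls "*"
            let trail := PySem.Str.endswith pls "*"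
            let s := if lead then 1 else 0
            let e := if trail then pl.length - 1 else pl.length
            ((pl.drop s).take (e - s), lead, trail))
      cores.any (fun cfg => pvOccAny name cfg.1 cfg.2.1 cfg.2.2)

-- ===== PRECONDITION & SPEC =====
def Spec_check_field_name_match_py (field_name : Option String) (pattern_info : List (String × List String)) (out : Bool) : Prop := out = check_field_name_match_py_alt field_name pattern_info
instance (field_name : Option String) (pattern_info : List (String × List String)) (out : Bool) : Decidable (Spec_check_field_name_match_py field_name pattern_info out) := by unfold Spec_check_field_name_match_py; infer_instance

-- ===== CLAIM (what is proved, stated in full; the proofs are below) =====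
def Claim_equal_check_field_name_match_py : Prop := ∀ (field_name : Option String) (pattern_info : List (String × List String)), Dom_check_field_name_match_py field_name pattern_info → Spec_check_field_name_match_py field_name pattern_info (check_field_name_match_py field_name pattern_info)

-- ===== LEMMAS AND PROOFS =====

-- range head: only i = 0 can satisfy a (i == 0)-guarded predicate
lemma pvRangeHead (m : Nat) (q : Nat → Bool) :
    (List.range (m + 1)).any (fun i => (i == 0) && q i) = q 0 := by
  rw [List.range_succ_eq_map]
  simp [List.any_map]

-- exact-match case: the scan with both anchors required equals list equality
lemma pvOcc_ff (xs c : List Char) : pvOccAny xs c false false = (xs == c) := by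
  unfold pvOccAny
  simp only [Bool.false_or]
  rw [show (fun i => (i == 0) && (i + c.length == xs.length) && ((xs.drop i).take c.length == c))
      = (fun i => (i == 0) && ((i + c.length == xs.length) && ((xs.drop i).take c.length == c)))
      from funext (fun i => by rw [Bool.and_assoc]), pvRangeHead]
  simp only [List.drop_zero, Nat.zero_add]
  cases h : (xs == c) with
  | true =>
    have : xs = c := by simpa using h
    subst this; simp
  | false =>
    have hne : xs ≠ c := by simpa using h
    by_cases hl : c.length = xs.length
    · have : xs.take c.length = xs := by rw [hl, List.take_length]
      simp [this, hne]
    · simp [hl]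

-- prefix case
lemma pvOcc_ft (xs c : List Char) : pvOccAny xs c false true = PySem.Chars.startswith xs c := by
  unfold pvOccAny
  simp only [Bool.false_or, Bool.true_or, Bool.and_true]
  rw [pvRangeHead]
  simp only [List.drop_zero]
  cases h : PySem.Chars.startswith xs c with
  | true =>
    obtain ⟨t, ht⟩ := (PySem.Chars.startswith_iff xs c).mp h
    subst ht; simp
  | false =>
    have h0 : ¬ c <+: xs := fun hp => by rw [(PySem.Chars.startswith_iff xs c).mpr hp] at h; cases h
    have h1 : c ≠ xs.take c.length := fun he => h0 (he ▸ List.take_prefix _ _)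
    simpa using fun he => h1 he.symm

-- suffix case
lemma pvOcc_tf (xs c : List Char) : pvOccAny xs c true false = PySem.Chars.endswith xs c := by
  unfold pvOccAny
  simp only [Bool.true_or, Bool.false_or, Bool.true_and]
  cases h : PySem.Chars.endswith xs c with
  | true =>
    obtain ⟨s, hs⟩ := (PySem.Chars.endswith_iff xs c).mp h
    subst hs
    rw [List.any_eq_true]
    refine ⟨s.length, ?_, ?_⟩
    · rw [List.mem_range, List.length_append]; omega
    · simp [List.length_append]
  | false =>
    have hns : ¬ c <:+ xs := fun hp => by rw [(PySem.Chars.endswith_iff xs c).mpr hp] at h; cases h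
    rw [List.any_eq_false]
    intro i _
    simp only [Bool.and_eq_true, beq_iff_eq, not_and]
    intro hlen heq
    apply hns
    have hdlen : (xs.drop i).length = c.length := by simp; omega
    have : xs.drop i = c := by rw [← heq, ← hdlen, List.take_length]
    exact this ▸ List.drop_suffix i xs

-- substring case
lemma pvOcc_tt (xs c : List Char) : pvOccAny xs c true true = PySem.Chars.isIn c xs := by
  unfold pvOccAny
  simp only [Bool.true_or, Bool.true_and]
  induction xs with
  | nil =>
    simp only [List.length_nil, Nat.zero_add, List.range_one, List.any_cons, List.any_nil,
               List.drop_nil, List.take_nil, Bool.or_false]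
    cases c with
    | nil => simp [PySem.Chars.isIn_nil]
    | cons a t =>
      have hni : ¬ (a::t) <:+: ([]:List Char) := by
        intro hp; have := List.eq_nil_of_infix_nil hp; simp at this
      have hf : PySem.Chars.isIn (a::t) [] = false := by
        cases h : PySem.Chars.isIn (a::t) [] with
        | true => exact absurd ((PySem.Chars.isIn_iff_infix _ _).mp h) hni
        | false => rfl
      simp [hf]
  | cons x t ih =>
    simp only [List.length_cons]
    rw [List.range_succ_eq_map, List.any_cons, List.any_map]
    show (((x :: t).take c.length == c) ||
        (List.range (t.length + 1)).any (fun i => ((t.drop i).take c.length == c)))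
        = PySem.Chars.isIn c (x :: t)
    rw [ih]
    cases hI : PySem.Chars.isIn c (x :: t) with
    | true =>
      have := (PySem.Chars.isIn_iff_infix c (x :: t)).mp hI
      rcases List.infix_cons_iff.mp this with hpre | hinf
      · have : c = (x :: t).take c.length := List.prefix_iff_eq_take.mp hpre
        simp [← this]
      · have : PySem.Chars.isIn c t = true := (PySem.Chars.isIn_iff_infix c t).mpr hinf
        simp [this]
    | false =>
      have hni : ¬ c <:+: (x :: t) := fun hp => by
        rw [(PySem.Chars.isIn_iff_infix c (x :: t)).mpr hp] at hI; cases hI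
      have h1 : ¬ c <+: (x :: t) := fun hp => hni (List.infix_cons_iff.mpr (Or.inl hp))
      have h2 : PySem.Chars.isIn c t = false := by
        cases h : PySem.Chars.isIn c t with
        | true => exact absurd (List.infix_cons_iff.mpr (Or.inr ((PySem.Chars.isIn_iff_infix c t).mp h))) hni
        | false => rfl
      have h1' : (x :: t).take c.length ≠ c :=
        fun he => h1 (List.prefix_iff_eq_take.mpr he.symm)
      simp [h2, h1']

-- A's exact-match pass is subsumed by its substring pass
lemma pvAny_exact_subsumed (l : List String) (fl : String) :
    ((if l.any (fun en => en == fl) then true else l.any (fun en => PySem.Str.isIn en fl))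
      = l.any (fun en => PySem.Str.isIn en fl)) := by
  by_cases h : l.any (fun en => en == fl) = true
  · have h2 : l.any (fun en => PySem.Str.isIn en fl) = true := by
      rw [List.any_eq_true] at h ⊢
      obtain ⟨en, hmem, hbeq⟩ := h
      have he : en = fl := by simpa using hbeq
      refine ⟨en, hmem, ?_⟩
      rw [PySem.Str.isIn_iff_infix, he]
    rw [if_pos h, h2]
  · rw [if_neg h]

-- A's p[1:-1] equals tail.dropLast on the list side
lemma pvSliceOneNegOne (xs : List Char) : PySem.List.slice xs (some 1) (some (-1)) = xs.tail.dropLast := by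
  cases xs with
  | nil => simp [PySem.List.slice]
  | cons a t => simp [PySem.List.slice, List.dropLast_eq_take]

-- A's four inline branches on a (lowered) pattern coincide with B's compiled (core, lead, trail) scan
lemma pvPatBranch (fl pls : String) :
    (if PySem.Str.startswith pls "*" && PySem.Str.endswith pls "*" then
        PySem.Str.isIn (PySem.Str.slice pls (some 1) (some (-1))) fl
      else if PySem.Str.startswith pls "*" then
        PySem.Str.endswith fl (PySem.Str.slice pls (some 1) none)
      else if PySem.Str.endswith pls "*" then
        PySem.Str.startswith fl (PySem.Str.slice pls none (some (-1)))
      else pls == fl)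
    = pvOccAny fl.toList
        ((pls.toList.drop (if PySem.Str.startswith pls "*" then 1 else 0)).take
          ((if PySem.Str.endswith pls "*" then pls.toList.length - 1 else pls.toList.length) -
           (if PySem.Str.startswith pls "*" then 1 else 0)))
        (PySem.Str.startswith pls "*") (PySem.Str.endswith pls "*") := by
  cases hl : PySem.Str.startswith pls "*" <;> cases ht : PySem.Str.endswith pls "*" <;>
    simp only [Bool.false_and, Bool.and_false, Bool.and_self,
               Bool.false_eq_true, if_false, if_true, List.drop_zero, Nat.sub_zero]
  · -- exact match
    rw [List.take_length, pvOcc_ff]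
    cases h : (pls == fl) with
    | true =>
      have : pls = fl := by simpa using h
      subst this; simp
    | false =>
      have hne : pls ≠ fl := by simpa using h
      have : fl.toList ≠ pls.toList := fun he => hne (String.toList_inj.mp he).symm
      simpa using this
  · -- prefix pattern text*
    rw [pvOcc_ft,
        show PySem.Str.startswith fl (PySem.Str.slice pls none (some (-1)))
          = PySem.Chars.startswith fl.toList (PySem.Str.slice pls none (some (-1))).toList from rfl,
        PySem.Str.slice_to_neg_one, List.dropLast_eq_take]
  · -- suffix pattern *text
    rw [pvOcc_tf,
        show PySem.Str.endswith fl (PySem.Str.slice pls (some 1) none)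
          = PySem.Chars.endswith fl.toList (PySem.Str.slice pls (some 1) none).toList from rfl]
    have h1 : (PySem.Str.slice pls (some 1) none).toList = pls.toList.drop 1 := by
      rw [PySem.Str.toList_slice, PySem.Chars.slice_eq_listSlice, PySem.List.slice_from_one,
          ← List.drop_one]
    rw [h1, List.take_of_length_le (by simp)]
  · -- wildcard pattern *text*
    rw [pvOcc_tt,
        show PySem.Str.isIn (PySem.Str.slice pls (some 1) (some (-1))) fl
          = PySem.Chars.isIn (PySem.Str.slice pls (some 1) (some (-1))).toList fl.toList from rfl]
    have h1 : (PySem.Str.slice pls (some 1) (some (-1))).toList = pls.toList.tail.dropLast := by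
      rw [PySem.Str.toList_slice, PySem.Chars.slice_eq_listSlice, pvSliceOneNegOne]
    rw [h1, List.dropLast_eq_take, List.length_tail, ← List.drop_one]

-- the field_names substring pass equals B's (core, true, true) scans
lemma pvNamesPass (names : List String) (fl : String) :
    (names.map (fun n => PySem.Str.lower n)).any (fun en => PySem.Str.isIn en fl)
    = (names.map (fun fnm => (((PySem.Str.lower fnm).toList : List Char), true, true))).any
        (fun cfg => pvOccAny fl.toList cfg.1 cfg.2.1 cfg.2.2) := by
  simp only [List.any_map]
  apply List.any_congr rfl
  intro n
  show PySem.Str.isIn (PySem.Str.lower n) fl = pvOccAny fl.toList (PySem.Str.lower n).toList true true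
  rw [pvOcc_tt]
  rfl

set_option maxHeartbeats 1000000 in
-- ===== VERDICT (by name: the statement is the Claim_ definition above) =====
theorem check_field_name_match_py_spec : Claim_equal_check_field_name_match_py := by
  intro field_name pattern_info _
  unfold Spec_check_field_name_match_py check_field_name_match_py check_field_name_match_py_alt
  cases field_name with
  | none => rfl
  | some fn =>
    by_cases hfn : fn == ""
    · simp only [hfn, if_true]
    · simp only [hfn, Bool.false_eq_true, if_false]
      generalize (PySem.Dict.mk pattern_info).get? "field_names" = onames
      generalize (PySem.Dict.mk pattern_info).get? "patterns" = opats
      have hpats : ∀ pats : List String,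
          (pats.any fun pat =>
            if (PySem.Str.startswith (PySem.Str.lower pat) "*" && PySem.Str.endswith (PySem.Str.lower pat) "*") = true then
              PySem.Str.isIn (PySem.Str.slice (PySem.Str.lower pat) (some 1) (some (-1))) (PySem.Str.lower fn)
            else if PySem.Str.startswith (PySem.Str.lower pat) "*" = true then
              PySem.Str.endswith (PySem.Str.lower fn) (PySem.Str.slice (PySem.Str.lower pat) (some 1) none)
            else if PySem.Str.endswith (PySem.Str.lower pat) "*" = true then
              PySem.Str.startswith (PySem.Str.lower fn) (PySem.Str.slice (PySem.Str.lower pat) none (some (-1)))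
            else PySem.Str.lower pat == PySem.Str.lower fn)
          = (pats.map (fun p =>
              ((((PySem.Str.lower p).toList.drop (if PySem.Str.startswith (PySem.Str.lower p) "*" then 1 else 0)).take
                  ((if PySem.Str.endswith (PySem.Str.lower p) "*" then (PySem.Str.lower p).toList.length - 1
                    else (PySem.Str.lower p).toList.length) -
                   (if PySem.Str.startswith (PySem.Str.lower p) "*" then 1 else 0)) : List Char),
               PySem.Str.startswith (PySem.Str.lower p) "*", PySem.Str.endswith (PySem.Str.lower p) "*"))).any
              (fun cfg => pvOccAny (PySem.Str.lower fn).toList cfg.1 cfg.2.1 cfg.2.2) := by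
        intro pats
        simp only [List.any_map]
        apply List.any_congr rfl
        intro pat
        exact pvPatBranch (PySem.Str.lower fn) (PySem.Str.lower pat)
      have hIf : ∀ (a r : Bool), (if a = true then true else r) = (a || r) := by
        intro a r; cases a <;> simp
      cases onames with
      | none =>
        cases opats with
        | none => rfl
        | some pats =>
          dsimp only
          simp only [Option.getD_some, Option.getD_none, List.map_nil, List.nil_append]
          exact hpats pats
      | some names =>
        dsimp only
        simp only [pvAny_exact_subsumed]
        cases opats with
        | none =>
          rw [hIf]
          simp only [Option.getD_some, Option.getD_none, List.map_nil, List.append_nil,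
                     Bool.or_false]
          exact pvNamesPass names (PySem.Str.lower fn)
        | some pats =>
          dsimp only
          rw [hIf, hpats pats, pvNamesPass]
          simp only [Option.getD_some, List.any_append]
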